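-- pv_equiv track=rewrite | github.com/Dontjirka/Python | Eugle.py | isEugle
-- ===== SOURCE A (Python) =====
-- def isEugle(g):
--     h = []
--     e = []
--     idk = 0
--     for i in g:
--         h.append(sum(i))
--     for j in h:
--         e.append(j%2)
--     for k in e:
--         if k == 1:
--             idk += 1
--             if idk == 3:
--                 return False
--     return True
-- ===== SOURCE B (Python) =====
-- def isEugle(g):
--     odd = 0
--     for row in g:
--         if sum(row) % 2 == 1:
--             odd += 1
--             if odd == 3:
--                 return False
--     return True
-- ===== Notes on version B (the rewrite author's own statement) =====
-- stated objective: simpler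
-- what changed: Replaces the three sequential passes building the intermediate h (row sums) and e (parities) lists with a single fused loop that keeps only a running odd-sum counter and exits early at 3.
import Mathlib
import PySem

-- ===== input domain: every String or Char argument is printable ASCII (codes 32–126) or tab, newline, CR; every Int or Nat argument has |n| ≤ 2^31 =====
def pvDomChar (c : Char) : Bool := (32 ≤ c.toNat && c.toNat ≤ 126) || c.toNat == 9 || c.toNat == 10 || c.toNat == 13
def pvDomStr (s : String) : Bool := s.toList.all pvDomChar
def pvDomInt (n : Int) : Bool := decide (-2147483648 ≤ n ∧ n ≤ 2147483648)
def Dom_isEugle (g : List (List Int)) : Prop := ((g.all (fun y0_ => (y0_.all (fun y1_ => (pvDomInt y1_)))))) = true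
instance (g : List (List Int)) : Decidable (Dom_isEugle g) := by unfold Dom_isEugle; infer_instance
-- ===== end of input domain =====

-- B fuses A's three passes (row sums list, parity list, counting loop) into one
-- counter loop with the same early exit at 3; objective: simpler.

-- ===== PORT A =====
-- third loop of A: scan the parity list with counter idk, early-return False at 3
def isEugleLoopA : List Int → Int → Bool
  | [], _ => true
  | k :: rest, idk =>
    if k == 1 then
      (if idk + 1 == 3 then false else isEugleLoopA rest (idk + 1))
    else isEugleLoopA rest idk

def isEugle (g : List (List Int)) : Bool :=
  let h : List Int := g.foldl (fun acc i => acc ++ [i.sum]) []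
  let e : List Int := h.foldl (fun acc j => acc ++ [PySem.Int.mod j 2]) []
  isEugleLoopA e 0

-- ===== PORT B =====
-- single pass over the rows with a running odd counter, early exit at 3
def isEugleLoopB : List (List Int) → Int → Bool
  | [], _ => true
  | row :: rest, odd =>
    if PySem.Int.mod row.sum 2 == 1 then
      (if odd + 1 == 3 then false else isEugleLoopB rest (odd + 1))
    else isEugleLoopB rest odd

def isEugle_alt (g : List (List Int)) : Bool := isEugleLoopB g 0

-- ===== PRECONDITION & SPEC =====
def Spec_isEugle (g : List (List Int)) (out : Bool) : Prop := out = isEugle_alt g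
instance (g : List (List Int)) (out : Bool) : Decidable (Spec_isEugle g out) := by unfold Spec_isEugle; infer_instance

-- ===== CLAIM (what is proved, stated in full; the proofs are below) =====
def Claim_equal_isEugle : Prop := ∀ (g : List (List Int)), Dom_isEugle g → Spec_isEugle g (isEugle g)

-- ===== LEMMAS AND PROOFS =====
theorem foldl_append_snoc {α β : Type} (f : α → β) (xs : List α) (acc : List β) :
    xs.foldl (fun a i => a ++ [f i]) acc = acc ++ xs.map f := by
  induction xs generalizing acc with
  | nil => simp
  | cons x xs ih => simp [List.foldl, ih]

theorem loopA_map_eq_loopB (g : List (List Int)) (idk : Int) :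
    isEugleLoopA (g.map (fun i => PySem.Int.mod i.sum 2)) idk = isEugleLoopB g idk := by
  induction g generalizing idk with
  | nil => rfl
  | cons row rest ih =>
    simp only [List.map, isEugleLoopA, isEugleLoopB]
    split_ifs <;> simp_all

-- ===== VERDICT (by name: the statement is the Claim_ definition above) =====
theorem isEugle_spec : Claim_equal_isEugle := by
  intro g _
  unfold Spec_isEugle isEugle isEugle_alt
  simp only [foldl_append_snoc (fun i => i.sum) g [],
    foldl_append_snoc (fun j => PySem.Int.mod j 2), List.nil_append, List.map_map]
  exact loopA_map_eq_loopB g 0
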